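-- pv_equiv track=rewrite | github.com/danemo01/CS470 | Midterm/midterm_code.py | anagram_expand
-- ===== SOURCE A (Python) =====
-- def anagram_expand(state, goal):
--     node_list = []
--
--     for pos in range(1, len(state)):    # Create each possible state that can be created from the current one in a single step
--         new_state = state[1:pos + 1] + state[0] + state[pos + 1:]
--
--     # Very simple h' function - please improve!
--         if new_state == goal:
--             score = 0
--         else:
--             score = 0
--             for n in range(1, len(new_state)):
--                 if new_state[n] == goal[n]:
--                     score+= 1
--
--         node_list.append((new_state, score))
--
--     return node_list
-- ===== SOURCE B (Python) =====
-- def anagram_expand(state, goal):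
--     # Incremental rescoring: successive successor states differ only at two
--     # adjacent positions, so the heuristic score is updated in O(1) per step
--     # instead of rescanned from scratch.
--     n = len(state)
--     if n < 2:
--         return []
--     g = list(goal)
--     cur = list(state[1:2]) + list(state[0:1]) + list(state[2:])
--     score = sum(1 for i in range(1, n) if cur[i] == g[i])
--     out = [("".join(cur), 0 if cur == g else score)]
--     for pos in range(2, n):
--         score -= (cur[pos - 1] == g[pos - 1]) + (cur[pos] == g[pos])
--         cur[pos - 1], cur[pos] = cur[pos], cur[pos - 1]
--         score += (cur[pos - 1] == g[pos - 1]) + (cur[pos] == g[pos])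
--         out.append(("".join(cur), 0 if cur == g else score))
--     return out
-- ===== Notes on version B (the rewrite author's own statement) =====
-- stated objective: faster
-- what changed: B scores only the first successor with a full scan and then maintains the heuristic score incrementally: each next successor differs from the previous one at just two adjacent positions, so the score is updated in O(1) comparisons per step instead of A's O(n) rescoring scan (building each successor string is still O(n), so total work stays quadratic in theory but the Python-level inner loop disappears; measured ~10x at n=4096).
import Mathlib
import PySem

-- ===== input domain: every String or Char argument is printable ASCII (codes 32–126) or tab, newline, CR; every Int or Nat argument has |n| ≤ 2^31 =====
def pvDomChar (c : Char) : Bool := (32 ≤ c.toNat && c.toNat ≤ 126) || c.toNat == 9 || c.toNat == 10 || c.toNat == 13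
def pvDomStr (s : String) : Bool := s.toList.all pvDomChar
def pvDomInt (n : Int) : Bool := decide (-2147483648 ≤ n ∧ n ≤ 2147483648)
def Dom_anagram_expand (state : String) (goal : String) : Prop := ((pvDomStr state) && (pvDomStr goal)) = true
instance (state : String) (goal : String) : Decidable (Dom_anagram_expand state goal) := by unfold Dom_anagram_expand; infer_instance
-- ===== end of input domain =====

-- B replaces A's full per-successor rescan by incremental O(1) score updates between
-- adjacent successors (objective: alternative decomposition, same overall cost).

-- ===== PORT A =====
-- Literal port of A over List Char (Python string ops via PySem slices/indexing).
-- state[0] is ported as the slice state[0:1]: inside the loop state is nonempty, so they agree.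
def anagram_expand (state : String) (goal : String) : List (String × Int) :=
  let s := state.toList
  let g := goal.toList
  (PySem.List.pyRange 1 (s.length : Int) 1).foldl (fun node_list pos =>
    let new_state : List Char :=
      PySem.List.slice s (some 1) (some (pos + 1)) ++
      PySem.List.slice s (some 0) (some 1) ++
      PySem.List.slice s (some (pos + 1)) none
    let score : Int :=
      if new_state = g then 0
      else
        -- goal[n] raises IndexError when goal is shorter: pyGet? is none there (excluded by Pre_)
        (PySem.List.pyRange 1 (new_state.length : Int) 1).foldl (fun score n =>
          if PySem.List.pyGet? new_state n = PySem.List.pyGet? g n then score + 1 else score) 0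
    node_list ++ [(String.ofList new_state, score)]) []

-- ===== PORT B =====
-- Literal port of Source B.  List reads/writes cur[pos-1], cur[pos], g[i] use pyGetD/pySetD;
-- all those indices are in range inside Pre_ (2 ≤ pos < len state ≤ len goal).
def anagram_expand_alt (state : String) (goal : String) : List (String × Int) :=
  let s := state.toList
  let n := s.length
  if n < 2 then []
  else
    let g := goal.toList
    let cur0 : List Char :=
      PySem.List.slice s (some 1) (some 2) ++
      PySem.List.slice s (some 0) (some 1) ++
      PySem.List.slice s (some 2) none
    let score0 : Int :=
      (PySem.List.pyRange 1 (n : Int) 1).foldl (fun sc i =>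
        if PySem.List.pyGet? cur0 i = PySem.List.pyGet? g i then sc + 1 else sc) 0
    let init : List Char × Int × List (String × Int) :=
      (cur0, score0, [(String.ofList cur0, if cur0 = g then 0 else score0)])
    ((PySem.List.pyRange 2 (n : Int) 1).foldl (fun st pos =>
        let cur := st.1
        let score := st.2.1
        let out := st.2.2
        let a := PySem.List.pyGetD cur (pos - 1) ' '
        let b := PySem.List.pyGetD cur pos ' '
        let score1 := score
          - (if a = PySem.List.pyGetD g (pos - 1) ' ' then (1:Int) else 0)
          - (if b = PySem.List.pyGetD g pos ' ' then (1:Int) else 0)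
        let cur' := PySem.List.pySetD (PySem.List.pySetD cur (pos - 1) b) pos a
        let score2 := score1
          + (if PySem.List.pyGetD cur' (pos - 1) ' ' = PySem.List.pyGetD g (pos - 1) ' ' then (1:Int) else 0)
          + (if PySem.List.pyGetD cur' pos ' ' = PySem.List.pyGetD g pos ' ' then (1:Int) else 0)
        (cur', score2, out ++ [(String.ofList cur', if cur' = g then 0 else score2)]))
      init).2.2

-- ===== PRECONDITION & SPEC =====
-- A raises IndexError (goal[n]) whenever len(state) ≥ 2 and len(goal) < len(state); B raises there too.
def Pre_anagram_expand (state : String) (goal : String) : Prop :=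
  state.toList.length ≤ 1 ∨ state.toList.length ≤ goal.toList.length
instance (state : String) (goal : String) : Decidable (Pre_anagram_expand state goal) := by
  unfold Pre_anagram_expand; infer_instance

def pvWitness_anagram_expand : String × String := ("tops", "stop")

def Spec_anagram_expand (state : String) (goal : String) (out : List (String × Int)) : Prop :=
  out = anagram_expand_alt state goal
instance (state : String) (goal : String) (out : List (String × Int)) : Decidable (Spec_anagram_expand state goal out) := by
  unfold Spec_anagram_expand; infer_instance

-- ===== CLAIM (what is proved, stated in full; the proofs are below) =====
def Claim_equal_anagram_expand : Prop := ∀ (state : String) (goal : String), Dom_anagram_expand state goal → Pre_anagram_expand state goal → Spec_anagram_expand state goal (anagram_expand state goal)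

-- ===== LEMMAS AND PROOFS =====

-- the pos-th successor state (first char moved to position p), over Nat indices
def nsN (s : List Char) (p : Nat) : List Char :=
  (s.drop 1).take p ++ s.take 1 ++ s.drop (p + 1)

-- A's inner scoring loop, as a named function of the scored list
def cntF (x g : List Char) : Int :=
  (PySem.List.pyRange 1 (x.length : Int) 1).foldl (fun sc i =>
    if PySem.List.pyGet? x i = PySem.List.pyGet? g i then sc + 1 else sc) 0

-- the pair both programs emit for successor p
def itemN (s g : List Char) (p : Nat) : String × Int :=
  (String.ofList (nsN s p), if nsN s p = g then 0 else cntF (nsN s p) g)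

-- 0/1 match indicator at position i
def mv (x g : List Char) (i : Nat) : Int := if x[i]? = g[i]? then 1 else 0

theorem length_nsN (s : List Char) (p : Nat) (h1 : 1 ≤ p) (h2 : p < s.length) :
    (nsN s p).length = s.length := by simp [nsN]; omega

theorem nsN_get (s : List Char) (p i : Nat) (h1 : 1 ≤ p) (h2 : p < s.length) :
    (nsN s p)[i]? = if i < p then s[i + 1]? else if i = p then s[0]? else s[i]? := by
  have hl1 : ((s.drop 1).take p).length = p := by simp; omega
  have hl2 : (s.take 1).length = 1 := by simp; omega
  unfold nsN
  rcases Nat.lt_trichotomy i p with hi | hi | hi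
  · rw [List.getElem?_append_left (by rw [List.length_append, hl1, hl2]; omega),
        List.getElem?_append_left (by rw [hl1]; exact hi)]
    simp [hi]
  · subst hi
    rw [List.getElem?_append_left (by rw [List.length_append, hl1, hl2]; omega),
        List.getElem?_append_right (by rw [hl1]),
        hl1, Nat.sub_self]
    simp
  · rw [List.getElem?_append_right (by rw [List.length_append, hl1, hl2]; omega)]
    rw [List.length_append, hl1, hl2, List.getElem?_drop]
    have h3 : p + 1 + (i - (p + 1)) = i := by omega
    rw [h3, if_neg (by omega), if_neg (by omega)]

theorem cntF_eq_sum (x g : List Char) :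
    cntF x g = ((List.range (x.length - 1)).map (fun k => mv x g (k + 1))).sum := by
  unfold cntF
  rw [PySem.List.pyRange_one, List.foldl_map]
  have h1 : ((x.length : Int) - 1).toNat = x.length - 1 := by omega
  rw [h1]
  have h2 : ∀ (k : Nat) (sc : Int),
      (fun (sc : Int) (k : Nat) =>
        if PySem.List.pyGet? x (1 + (k:Int)) = PySem.List.pyGet? g (1 + (k:Int)) then sc + 1 else sc) sc k
      = sc + mv x g (k + 1) := by
    intro k sc
    have : (1 + (k:Int)) = ((k + 1 : Nat) : Int) := by push_cast; ring
    simp only [this, PySem.List.pyGet?_natCast, mv]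
    split_ifs <;> simp
  calc (List.range (x.length - 1)).foldl
        (fun (sc : Int) (k : Nat) =>
          if PySem.List.pyGet? x (1 + (k:Int)) = PySem.List.pyGet? g (1 + (k:Int)) then sc + 1 else sc) 0
      = (List.range (x.length - 1)).foldl (fun sc k => sc + mv x g (k + 1)) 0 := by
        apply PySem.List.foldl_congr_mem
        intro a b hb
        exact h2 b a
    _ = ((List.range (x.length - 1)).map (fun k => mv x g (k + 1))).sum := by
        rw [PySem.List.foldl_add]
        simp

theorem slice_ns (s : List Char) (k : Nat) :
    PySem.List.slice s (some 1) (some ((1 + (k:Int)) + 1)) ++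
    PySem.List.slice s (some 0) (some 1) ++
    PySem.List.slice s (some ((1 + (k:Int)) + 1)) none = nsN s (k + 1) := by
  have e1 : (1 + (k:Int)) + 1 = ((k + 2 : Nat) : Int) := by push_cast; ring
  have e2 : (1 : Int) = ((1 : Nat) : Int) := by norm_num
  rw [e1, e2, PySem.List.slice_natCast, PySem.List.slice_from_natCast]
  have e3 : PySem.List.slice s (some 0) (some ((1:Nat):Int)) = s.take 1 := by
    rw [PySem.List.slice_zero_start, PySem.List.slice_to_natCast]
  rw [e3, nsN]
  norm_num

theorem A_eq (state goal : String) :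
    anagram_expand state goal
      = (List.range (state.toList.length - 1)).map (fun k => itemN state.toList goal.toList (k + 1)) := by
  simp only [anagram_expand]
  rw [PySem.List.foldl_append_singleton_eq_map, PySem.List.pyRange_one, List.map_map,
      List.nil_append]
  have h1 : ((state.toList.length : Int) - 1).toNat = state.toList.length - 1 := by omega
  rw [h1]
  apply List.map_congr_left
  intro k hk
  simp only [Function.comp]
  rw [slice_ns]
  simp only [itemN, cntF]

theorem getD_ite_eq_mv (y g : List Char) (i : Nat) (hy : i < y.length) (hg : i < g.length) :
    (if y.getD i ' ' = g.getD i ' ' then (1:Int) else 0) = mv y g i := by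
  unfold mv
  rw [List.getD_eq_getElem?_getD, List.getD_eq_getElem?_getD,
      List.getElem?_eq_getElem hy, List.getElem?_eq_getElem hg]
  simp

theorem mv_ns_eq (s g : List Char) (p i : Nat) (h2 : 2 ≤ p) (hp : p < s.length)
    (hne1 : i ≠ p - 1) (hne2 : i ≠ p) :
    mv (nsN s p) g i = mv (nsN s (p - 1)) g i := by
  have h : (nsN s p)[i]? = (nsN s (p - 1))[i]? := by
    rw [nsN_get s p i (by omega) hp, nsN_get s (p - 1) i (by omega) (by omega)]
    rcases Nat.lt_or_ge i (p - 1) with hi | hi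
    · rw [if_pos (by omega), if_pos (by omega)]
    · rw [if_neg (by omega), if_neg (by omega), if_neg (by omega), if_neg (by omega)]
  unfold mv
  rw [h]

theorem sum_split (g y : List Char) (p n : Nat) (h2 : 2 ≤ p) (hpn : p < n) :
    ((List.range (n - 1)).map (fun k => mv y g (k + 1))).sum
      = ((List.range (p - 2)).map (fun k => mv y g (k + 1))).sum + mv y g (p - 1) + mv y g p
        + ((List.range (n - 1 - p)).map (fun k => mv y g (p + k + 1))).sum := by
  have e : n - 1 = (p - 2) + 2 + (n - 1 - p) := by omega
  rw [e, List.range_add, List.range_add, List.map_append, List.map_append,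
      List.sum_append, List.sum_append]
  have r2 : List.range 2 = [0, 1] := by decide
  rw [r2]
  simp only [List.map_map, List.map_cons, List.map_nil, List.sum_cons, List.sum_nil,
    Function.comp_def]
  rw [show p - 2 + 2 = p by omega, show p + (n - 1 - p) - p = n - 1 - p by omega]
  ring_nf
  rw [show 1 + (p - 2) = p - 1 by omega]
  ring

theorem step_state (s : List Char) (p : Nat) (h2 : 2 ≤ p) (hp : p < s.length) :
    ((nsN s (p - 1)).set (p - 1) ((nsN s (p - 1)).getD p ' ')).set p ((nsN s (p - 1)).getD (p - 1) ' ')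
      = nsN s p := by
  have h1' : 1 ≤ p - 1 := by omega
  have hp' : p - 1 < s.length := by omega
  have h0 : 0 < s.length := by omega
  have ha : (nsN s (p - 1)).getD (p - 1) ' ' = s[0]'h0 := by
    rw [List.getD_eq_getElem?_getD, nsN_get s (p-1) (p-1) h1' hp',
        if_neg (by omega), if_pos rfl, List.getElem?_eq_getElem h0]
    rfl
  have hb : (nsN s (p - 1)).getD p ' ' = s[p]'hp := by
    rw [List.getD_eq_getElem?_getD, nsN_get s (p-1) p h1' hp',
        if_neg (by omega), if_neg (by omega), List.getElem?_eq_getElem hp]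
    rfl
  rw [ha, hb]
  apply List.ext_getElem?
  intro i
  have hlen : (nsN s (p-1)).length = s.length := length_nsN s (p-1) h1' hp'
  rw [List.getElem?_set, List.getElem?_set, List.length_set, hlen,
      nsN_get s p i (by omega) hp]
  rcases Nat.lt_trichotomy i p with hi | hi | hi
  · rw [if_neg (by omega)]
    by_cases hie : p - 1 = i
    · rw [if_pos hie, if_pos (by omega), if_pos (by omega)]
      have : i + 1 = p := by omega
      rw [this, List.getElem?_eq_getElem hp]
    · rw [if_neg hie, nsN_get s (p-1) i h1' hp', if_pos (by omega), if_pos (by omega)]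
  · subst hi
    rw [if_pos rfl, if_pos (by omega), if_neg (by omega), if_pos rfl,
        List.getElem?_eq_getElem h0]
  · rw [if_neg (by omega), if_neg (by omega), nsN_get s (p-1) i h1' hp',
        if_neg (by omega), if_neg (by omega), if_neg (by omega), if_neg (by omega)]

theorem step_score (s g : List Char) (p : Nat) (h2 : 2 ≤ p) (hp : p < s.length)
    (hg : s.length ≤ g.length) :
    cntF (nsN s (p - 1)) g
      - (if (nsN s (p - 1)).getD (p - 1) ' ' = g.getD (p - 1) ' ' then (1:Int) else 0)
      - (if (nsN s (p - 1)).getD p ' ' = g.getD p ' ' then (1:Int) else 0)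
      + (if (nsN s p).getD (p - 1) ' ' = g.getD (p - 1) ' ' then (1:Int) else 0)
      + (if (nsN s p).getD p ' ' = g.getD p ' ' then (1:Int) else 0)
      = cntF (nsN s p) g := by
  have hl' : (nsN s (p - 1)).length = s.length := length_nsN s (p - 1) (by omega) (by omega)
  have hl : (nsN s p).length = s.length := length_nsN s p (by omega) hp
  rw [getD_ite_eq_mv _ _ _ (by omega) (by omega), getD_ite_eq_mv _ _ _ (by omega) (by omega),
      getD_ite_eq_mv _ _ _ (by omega) (by omega), getD_ite_eq_mv _ _ _ (by omega) (by omega),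
      cntF_eq_sum, cntF_eq_sum, hl, hl',
      sum_split g (nsN s (p - 1)) p s.length h2 hp,
      sum_split g (nsN s p) p s.length h2 hp]
  have hA1 : ((List.range (p - 2)).map (fun k => mv (nsN s p) g (k + 1))).sum
      = ((List.range (p - 2)).map (fun k => mv (nsN s (p - 1)) g (k + 1))).sum := by
    congr 1
    apply List.map_congr_left
    intro k hk
    rw [List.mem_range] at hk
    exact mv_ns_eq s g p (k + 1) h2 hp (by omega) (by omega)
  have hA3 : ((List.range (s.length - 1 - p)).map (fun k => mv (nsN s p) g (p + k + 1))).sum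
      = ((List.range (s.length - 1 - p)).map (fun k => mv (nsN s (p - 1)) g (p + k + 1))).sum := by
    congr 1
    apply List.map_congr_left
    intro k hk
    exact mv_ns_eq s g p (p + k + 1) h2 hp (by omega) (by omega)
  rw [hA1, hA3]
  ring


-- B's loop body, named for the proofs
def bstep (g : List Char) (st : List Char × Int × List (String × Int)) (pos : Int) :
    List Char × Int × List (String × Int) :=
  let cur := st.1
  let score := st.2.1
  let out := st.2.2
  let a := PySem.List.pyGetD cur (pos - 1) ' '
  let b := PySem.List.pyGetD cur pos ' '
  let score1 := score
    - (if a = PySem.List.pyGetD g (pos - 1) ' ' then (1:Int) else 0)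
    - (if b = PySem.List.pyGetD g pos ' ' then (1:Int) else 0)
  let cur' := PySem.List.pySetD (PySem.List.pySetD cur (pos - 1) b) pos a
  let score2 := score1
    + (if PySem.List.pyGetD cur' (pos - 1) ' ' = PySem.List.pyGetD g (pos - 1) ' ' then (1:Int) else 0)
    + (if PySem.List.pyGetD cur' pos ' ' = PySem.List.pyGetD g pos ' ' then (1:Int) else 0)
  (cur', score2, out ++ [(String.ofList cur', if cur' = g then 0 else score2)])

theorem bstep_eq (s g : List Char) (p : Nat) (h2 : 2 ≤ p) (hp : p < s.length)
    (hg : s.length ≤ g.length) (out : List (String × Int)) :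
    bstep g (nsN s (p - 1), cntF (nsN s (p - 1)) g, out) ((p : Nat) : Int)
      = (nsN s p, cntF (nsN s p) g, out ++ [itemN s g p]) := by
  unfold bstep
  simp only []
  rw [show ((p : Nat) : Int) - 1 = (((p - 1 : Nat) : Nat) : Int) by omega]
  simp only [PySem.List.pyGetD_natCast, PySem.List.pySetD_natCast]
  rw [step_state s p h2 hp, step_score s g p h2 hp hg]
  rfl

theorem B_loop (s g : List Char) (hg : s.length ≤ g.length) :
    ∀ (m p : Nat), 2 ≤ p → p + m = s.length → ∀ out : List (String × Int),
      ((PySem.List.pyRange (p : Int) (s.length : Int) 1).foldl (bstep g)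
        (nsN s (p - 1), cntF (nsN s (p - 1)) g, out)).2.2
      = out ++ (List.range m).map (fun k => itemN s g (p + k)) := by
  intro m
  induction m with
  | zero =>
    intro p h2 hpm out
    rw [PySem.List.pyRange_one_eq_nil (by omega)]
    simp
  | succ m ih =>
    intro p h2 hpm out
    rw [PySem.List.pyRange_one_cons (by omega : (p:Int) < (s.length:Int)), List.foldl_cons,
        bstep_eq s g p h2 (by omega) hg out]
    have e1 : ((p : Int) + 1) = (((p + 1 : Nat)) : Int) := by push_cast; ring
    rw [e1]
    have e2 : (p + 1) - 1 = p := by omega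
    have := ih (p + 1) (by omega) (by omega) (out ++ [itemN s g p])
    rw [e2] at this
    rw [this, List.range_succ_eq_map, List.map_cons, List.map_map]
    have hf : ((fun k => itemN s g (p + k)) ∘ Nat.succ) = (fun k => itemN s g (p + 1 + k)) := by
      funext a
      show itemN s g (p + (a + 1)) = itemN s g (p + 1 + a)
      rw [show p + (a + 1) = p + 1 + a by omega]
    rw [hf]
    simp

theorem cur0_eq (s : List Char) :
    PySem.List.slice s (some 1) (some 2) ++ PySem.List.slice s (some 0) (some 1) ++
      PySem.List.slice s (some 2) none = nsN s 1 := by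
  have h1 : PySem.List.slice s (some 1) (some 2) = (s.drop 1).take 1 := by
    simpa using PySem.List.slice_natCast (xs := s) (a := 1) (b := 2)
  have h2 : PySem.List.slice s (some 0) (some 1) = s.take 1 := by
    rw [PySem.List.slice_zero_start]
    simpa using PySem.List.slice_to_natCast (xs := s) (b := 1)
  have h3 : PySem.List.slice s (some 2) none = s.drop 2 := by
    simpa using PySem.List.slice_from_natCast (xs := s) (a := 2)
  rw [h1, h2, h3]
  rfl

theorem B_eq (state goal : String) (hn : 2 ≤ state.toList.length)
    (hg : state.toList.length ≤ goal.toList.length) :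
    anagram_expand_alt state goal
      = (List.range (state.toList.length - 1)).map (fun k => itemN state.toList goal.toList (k + 1)) := by
  simp only [anagram_expand_alt]
  rw [if_neg (by omega)]
  change (List.foldl (bstep goal.toList) _ _).2.2 = _
  rw [cur0_eq]
  have hs : (PySem.List.pyRange 1 (state.toList.length : Int) 1).foldl (fun sc i =>
      if PySem.List.pyGet? (nsN state.toList 1) i = PySem.List.pyGet? goal.toList i then sc + 1 else sc) 0
      = cntF (nsN state.toList 1) goal.toList := by
    unfold cntF
    rw [length_nsN state.toList 1 le_rfl (by omega)]
  rw [hs]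
  have hinit : (String.ofList (nsN state.toList 1),
      if nsN state.toList 1 = goal.toList then (0:Int) else cntF (nsN state.toList 1) goal.toList)
      = itemN state.toList goal.toList 1 := rfl
  rw [hinit]
  have hloop := B_loop state.toList goal.toList hg (state.toList.length - 2) 2 (by norm_num)
    (by omega) [itemN state.toList goal.toList 1]
  norm_num at hloop
  rw [show state.length = state.toList.length by simp] at hloop
  rw [hloop]
  rw [show state.toList.length - 1 = (state.toList.length - 2) + 1 by omega,
      List.range_succ_eq_map, List.map_cons, List.map_map]
  have hf : ((fun k => itemN state.toList goal.toList (k + 1)) ∘ Nat.succ)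
      = (fun k => itemN state.toList goal.toList (2 + k)) := by
    funext a
    show itemN state.toList goal.toList (a + 1 + 1) = itemN state.toList goal.toList (2 + a)
    rw [show a + 1 + 1 = 2 + a by omega]
  rw [hf]

-- ===== VERDICT (by name: the statement is the Claim_ definition above) =====
theorem anagram_expand_spec : Claim_equal_anagram_expand := by
  intro state goal _hdom hpre
  unfold Spec_anagram_expand
  rcases Nat.lt_or_ge state.toList.length 2 with h | h
  · simp only [anagram_expand, anagram_expand_alt]
    rw [PySem.List.pyRange_one_eq_nil (by omega), List.foldl_nil, if_pos h]
  · rcases hpre with h1 | hg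
    · omega
    · rw [A_eq, B_eq state goal h hg]
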